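-- pv_equiv track=rewrite | github.com/pypi-data/pypi-mirror-360 | packages/mseep-mcp-task-orchestrator/mseep_mcp_task_orchestrator-1.8.0.tar.gz/mseep_mcp_task_orchestrator-1.8.0/mcp_task_orchestrator/orchestrator/enhanced_server.py | _check_unbalanced_elements
-- ===== SOURCE A (Python) =====
-- from typing import Dict, List, Any, Optional
--
-- def _check_unbalanced_elements(content: str) -> List[Dict[str, str]]:
--     """Check for unbalanced elements that might indicate truncation."""
--     issues = []
--
--     # Check for unbalanced code blocks
--     code_block_count = content.count("```")
--     if code_block_count % 2 != 0:
--         issues.append({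
--             "type": "unbalanced_code_blocks",
--             "description": f"Found {code_block_count} code block markers (should be even)"
--         })
--
--     # Check for unbalanced parentheses, brackets, braces
--     balancing_chars = {
--         '(': ')', '[': ']', '{': '}'
--     }
--
--     for open_char, close_char in balancing_chars.items():
--         open_count = content.count(open_char)
--         close_count = content.count(close_char)
--         if open_count != close_count:
--             issues.append({
--                 "type": "unbalanced_delimiters",
--                 "description": f"Unbalanced {open_char}{close_char}: {open_count} open, {close_count} close"
--             })
--
--     # Check for unfinished markdown elements
--     if content.count('**') % 2 != 0:
--         issues.append({
--             "type": "unbalanced_bold_markers",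
--             "description": "Unbalanced bold (**) markers"
--         })
--
--     if content.count('*') % 2 != 0:
--         issues.append({
--             "type": "unbalanced_italic_markers",
--             "description": "Unbalanced italic (*) markers"
--         })
--
--     return issues
-- ===== SOURCE B (Python) =====
-- def _check_unbalanced_elements(content):
--     """Single pass: track run lengths of backticks/asterisks and bracket counters."""
--     bt = star = code = bold = stars = 0
--     po = pc = bo = bc = co = cc = 0
--     for ch in content:
--         if ch == '`':
--             bt += 1
--             bold += star // 2
--             star = 0
--         elif ch == '*':
--             star += 1
--             stars += 1
--             code += bt // 3
--             bt = 0
--         else: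
--             code += bt // 3
--             bt = 0
--             bold += star // 2
--             star = 0
--             if ch == '(':
--                 po += 1
--             elif ch == ')':
--                 pc += 1
--             elif ch == '[':
--                 bo += 1
--             elif ch == ']':
--                 bc += 1
--             elif ch == '{':
--                 co += 1
--             elif ch == '}':
--                 cc += 1
--     code += bt // 3
--     bold += star // 2
--     issues = []
--     if code % 2 != 0:
--         issues.append({
--             "type": "unbalanced_code_blocks",
--             "description": f"Found {code} code block markers (should be even)"
--         })
--     for oc, cl, o, c in (('(', ')', po, pc), ('[', ']', bo, bc), ('{', '}', co, cc)):
--         if o != c: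
--             issues.append({
--                 "type": "unbalanced_delimiters",
--                 "description": f"Unbalanced {oc}{cl}: {o} open, {c} close"
--             })
--     if bold % 2 != 0:
--         issues.append({
--             "type": "unbalanced_bold_markers",
--             "description": "Unbalanced bold (**) markers"
--         })
--     if stars % 2 != 0:
--         issues.append({
--             "type": "unbalanced_italic_markers",
--             "description": "Unbalanced italic (*) markers"
--         })
--     return issues
-- ===== Notes on version B (the rewrite author's own statement) =====
-- stated objective: alternative
-- what changed: Replaces A's seven separate str.count scans of the string by one linear pass that tracks the current run lengths of consecutive backticks and asterisks (adding run//3 to the code-block count and run//2 to the bold count when a run ends) together with six bracket counters, then builds the same issues list in the same order.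
import Mathlib
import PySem

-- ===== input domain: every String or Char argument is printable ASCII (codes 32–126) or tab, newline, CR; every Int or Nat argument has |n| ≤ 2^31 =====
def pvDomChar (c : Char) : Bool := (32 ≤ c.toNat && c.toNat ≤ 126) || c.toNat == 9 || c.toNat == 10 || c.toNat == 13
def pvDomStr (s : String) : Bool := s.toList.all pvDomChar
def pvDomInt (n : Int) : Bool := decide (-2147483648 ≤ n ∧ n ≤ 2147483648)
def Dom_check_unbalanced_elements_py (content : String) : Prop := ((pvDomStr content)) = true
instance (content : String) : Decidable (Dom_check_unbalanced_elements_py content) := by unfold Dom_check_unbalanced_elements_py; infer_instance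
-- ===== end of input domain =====

-- B replaces A's seven str.count scans by one linear pass tracking backtick/asterisk run lengths and bracket counters (objective: alternative single-pass algorithm).

-- ===== PORT A =====
-- the literal dict {'(' : ')', '[' : ']', '{' : '}'} as its items in insertion order
def pvBalancingChars : List (String × String) := [("(", ")"), ("[", "]"), ("{", "}")]

def check_unbalanced_elements_py (content : String) : List (List (String × String)) :=
  let issues : List (List (String × String)) := []
  let code_block_count := PySem.Str.count content "```"
  let issues := if code_block_count % 2 ≠ 0 then
      issues ++ [[("type", "unbalanced_code_blocks"),
                  ("description", "Found " ++ PySem.Int.toStr (code_block_count : Int) ++ " code block markers (should be even)")]]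
    else issues
  let issues := pvBalancingChars.foldl (fun issues p =>
      let open_count := PySem.Str.count content p.1
      let close_count := PySem.Str.count content p.2
      if open_count ≠ close_count then
        issues ++ [[("type", "unbalanced_delimiters"),
                    ("description", "Unbalanced " ++ p.1 ++ p.2 ++ ": " ++ PySem.Int.toStr (open_count : Int) ++ " open, " ++ PySem.Int.toStr (close_count : Int) ++ " close")]]
      else issues) issues
  let issues := if PySem.Str.count content "**" % 2 ≠ 0 then
      issues ++ [[("type", "unbalanced_bold_markers"), ("description", "Unbalanced bold (**) markers")]]
    else issues
  let issues := if PySem.Str.count content "*" % 2 ≠ 0 then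
      issues ++ [[("type", "unbalanced_italic_markers"), ("description", "Unbalanced italic (*) markers")]]
    else issues
  issues

-- ===== PORT B =====
structure PvSt where
  bt : Nat
  star : Nat
  code : Nat
  bold : Nat
  stars : Nat
  po : Nat
  pc : Nat
  bo : Nat
  bc : Nat
  co : Nat
  cc : Nat
deriving Repr, DecidableEq

def pvStep (s : PvSt) (ch : Char) : PvSt :=
  if ch = '`' then { s with bt := s.bt + 1, bold := s.bold + s.star / 2, star := 0 }
  else if ch = '*' then { s with star := s.star + 1, stars := s.stars + 1, code := s.code + s.bt / 3, bt := 0 }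
  else
    let s := { s with code := s.code + s.bt / 3, bt := 0, bold := s.bold + s.star / 2, star := 0 }
    if ch = '(' then { s with po := s.po + 1 }
    else if ch = ')' then { s with pc := s.pc + 1 }
    else if ch = '[' then { s with bo := s.bo + 1 }
    else if ch = ']' then { s with bc := s.bc + 1 }
    else if ch = '{' then { s with co := s.co + 1 }
    else if ch = '}' then { s with cc := s.cc + 1 }
    else s

def check_unbalanced_elements_py_alt (content : String) : List (List (String × String)) :=
  let s := content.toList.foldl pvStep ⟨0, 0, 0, 0, 0, 0, 0, 0, 0, 0, 0⟩
  let code := s.code + s.bt / 3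
  let bold := s.bold + s.star / 2
  (if code % 2 ≠ 0 then
      [[("type", "unbalanced_code_blocks"),
        ("description", "Found " ++ PySem.Int.toStr (code : Int) ++ " code block markers (should be even)")]]
    else []) ++
  (if s.po ≠ s.pc then
      [[("type", "unbalanced_delimiters"),
        ("description", "Unbalanced " ++ "(" ++ ")" ++ ": " ++ PySem.Int.toStr (s.po : Int) ++ " open, " ++ PySem.Int.toStr (s.pc : Int) ++ " close")]]
    else []) ++
  (if s.bo ≠ s.bc then
      [[("type", "unbalanced_delimiters"),
        ("description", "Unbalanced " ++ "[" ++ "]" ++ ": " ++ PySem.Int.toStr (s.bo : Int) ++ " open, " ++ PySem.Int.toStr (s.bc : Int) ++ " close")]]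
    else []) ++
  (if s.co ≠ s.cc then
      [[("type", "unbalanced_delimiters"),
        ("description", "Unbalanced " ++ "{" ++ "}" ++ ": " ++ PySem.Int.toStr (s.co : Int) ++ " open, " ++ PySem.Int.toStr (s.cc : Int) ++ " close")]]
    else []) ++
  (if bold % 2 ≠ 0 then
      [[("type", "unbalanced_bold_markers"), ("description", "Unbalanced bold (**) markers")]]
    else []) ++
  (if s.stars % 2 ≠ 0 then
      [[("type", "unbalanced_italic_markers"), ("description", "Unbalanced italic (*) markers")]]
    else [])

-- ===== PRECONDITION & SPEC =====
def Spec_check_unbalanced_elements_py (content : String) (out : List (List (String × String))) : Prop := out = check_unbalanced_elements_py_alt content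
instance (content : String) (out : List (List (String × String))) : Decidable (Spec_check_unbalanced_elements_py content out) := by unfold Spec_check_unbalanced_elements_py; infer_instance

-- ===== CLAIM (what is proved, stated in full; the proofs are below) =====
def Claim_equal_check_unbalanced_elements_py : Prop := ∀ (content : String), Dom_check_unbalanced_elements_py content → Spec_check_unbalanced_elements_py content (check_unbalanced_elements_py content)

-- ===== LEMMAS AND PROOFS =====

-- greedy non-overlapping count at exact fuel
def pvCnt (sub l : List Char) : Nat := PySem.Chars.count.go sub l.length l 0

theorem pv_go_norm (sub : List Char) (hsub : sub ≠ []) :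
    ∀ (fuel : Nat) (l : List Char) (acc : Nat), l.length ≤ fuel →
      PySem.Chars.count.go sub fuel l acc = acc + pvCnt sub l := by
  intro fuel
  induction fuel using Nat.strong_induction_on with
  | _ fuel ih =>
    match fuel with
    | 0 =>
      intro l acc h
      have : l = [] := List.eq_nil_of_length_eq_zero (Nat.le_zero.mp h)
      subst this
      simp [pvCnt, PySem.Chars.count.go]
    | (n + 1) =>
      intro l acc h
      cases l with
      | nil => simp [pvCnt, PySem.Chars.count.go]
      | cons x t =>
        have hsl : 1 ≤ sub.length := by
          cases sub with
          | nil => exact absurd rfl hsub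
          | cons a b => simp
        rw [pvCnt]
        simp only [List.length_cons, PySem.Chars.count.go]
        have hlt : t.length ≤ n := by simp at h; omega
        have hdl : (List.drop sub.length (x :: t)).length ≤ t.length := by
          simp only [List.length_drop, List.length_cons]
          omega
        by_cases hp : sub.isPrefixOf (x :: t) = true
        · simp only [hp, if_true]
          rw [ih n (by omega) _ _ (hdl.trans hlt)]
          rw [ih t.length (by omega) _ _ hdl]
          omega
        · rw [Bool.not_eq_true] at hp
          simp only [hp, Bool.false_eq_true, if_false]
          rw [ih n (by omega) _ _ hlt, ih t.length (by omega) _ _ le_rfl]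
          omega

theorem pv_cnt_cons_ne (c : Char) (rest : List Char) (ch : Char) (hch : ch ≠ c) (l : List Char) :
    pvCnt (c :: rest) (ch :: l) = pvCnt (c :: rest) l := by
  have hcb : (c == ch) = false := beq_eq_false_iff_ne.mpr (Ne.symm hch)
  have hp : (c :: rest).isPrefixOf (ch :: l) = false := by simp [List.isPrefixOf, hcb]
  rw [pvCnt]
  simp only [List.length_cons, PySem.Chars.count.go, hp, Bool.false_eq_true, if_false]
  rfl

theorem pv_cnt_single (c : Char) (l : List Char) : pvCnt [c] l = l.count c := by
  induction l with
  | nil => simp [pvCnt, PySem.Chars.count.go]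
  | cons x t ih =>
    by_cases hx : x = c
    · subst hx
      rw [pvCnt]
      simp only [List.length_cons, PySem.Chars.count.go]
      have hp : [x].isPrefixOf (x :: t) = true := by simp [List.isPrefixOf]
      simp only [hp, if_true]
      simp only [List.length_nil, List.drop_succ_cons, List.drop_zero]
      rw [pv_go_norm [x] (by simp) t.length t (0 + 1) le_rfl, ih]
      simp
      omega
    · rw [pv_cnt_cons_ne c [] x hx t, ih]
      simp [hx]

theorem pv_cnt_triple_run (c : Char) :
    ∀ (r : Nat) (l : List Char), (∀ x ∈ l.head?, x ≠ c) →
      pvCnt [c, c, c] (List.replicate r c ++ l) = r / 3 + pvCnt [c, c, c] l := by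
  intro r
  induction r using Nat.strong_induction_on with
  | _ r ih =>
    intro l hl
    match r with
    | 0 => simp
    | 1 =>
      have hp : [c, c, c].isPrefixOf (c :: l) = false := by
        cases l with
        | nil => simp [List.isPrefixOf]
        | cons x t =>
          have hxc : (c == x) = false := beq_eq_false_iff_ne.mpr (Ne.symm (hl x (by simp)))
          simp [List.isPrefixOf, hxc]
      rw [show List.replicate 1 c ++ l = c :: l from by simp]
      rw [pvCnt]
      simp only [List.length_cons, PySem.Chars.count.go, hp, Bool.false_eq_true, if_false]
      simp [pvCnt]
    | 2 =>
      have hp : [c, c, c].isPrefixOf (c :: c :: l) = false := by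
        cases l with
        | nil => simp [List.isPrefixOf]
        | cons x t =>
          have hxc : (c == x) = false := beq_eq_false_iff_ne.mpr (Ne.symm (hl x (by simp)))
          simp [List.isPrefixOf, hxc]
      have hp1 : [c, c, c].isPrefixOf (c :: l) = false := by
        cases l with
        | nil => simp [List.isPrefixOf]
        | cons x t =>
          have hxc : (c == x) = false := beq_eq_false_iff_ne.mpr (Ne.symm (hl x (by simp)))
          simp [List.isPrefixOf, hxc]
      rw [show List.replicate 2 c ++ l = c :: c :: l from by simp [List.replicate_succ]]
      rw [pvCnt]
      simp only [List.length_cons, PySem.Chars.count.go, hp, hp1, Bool.false_eq_true, if_false]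
      simp [pvCnt]
    | (n + 3) =>
      have hp : [c, c, c].isPrefixOf (c :: c :: c :: (List.replicate n c ++ l)) = true := by
        simp [List.isPrefixOf]
      have hrep : List.replicate (n + 3) c ++ l = c :: c :: c :: (List.replicate n c ++ l) := by
        simp [List.replicate_succ]
      rw [hrep, pvCnt]
      simp only [List.length_cons, PySem.Chars.count.go, hp, if_true]
      simp only [List.length_nil, List.drop_succ_cons, List.drop_zero]
      rw [pv_go_norm [c, c, c] (by simp) _ _ _ (Nat.le_add_right _ 2)]
      rw [ih n (by omega) l hl]
      omega

theorem pv_cnt_double_run (c : Char) :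
    ∀ (r : Nat) (l : List Char), (∀ x ∈ l.head?, x ≠ c) →
      pvCnt [c, c] (List.replicate r c ++ l) = r / 2 + pvCnt [c, c] l := by
  intro r
  induction r using Nat.strong_induction_on with
  | _ r ih =>
    intro l hl
    match r with
    | 0 => simp
    | 1 =>
      have hp : [c, c].isPrefixOf (c :: l) = false := by
        cases l with
        | nil => simp [List.isPrefixOf]
        | cons x t =>
          have hxc : (c == x) = false := beq_eq_false_iff_ne.mpr (Ne.symm (hl x (by simp)))
          simp [List.isPrefixOf, hxc]
      rw [show List.replicate 1 c ++ l = c :: l from by simp]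
      rw [pvCnt]
      simp only [List.length_cons, PySem.Chars.count.go, hp, Bool.false_eq_true, if_false]
      simp [pvCnt]
    | (n + 2) =>
      have hp : [c, c].isPrefixOf (c :: c :: (List.replicate n c ++ l)) = true := by
        simp [List.isPrefixOf]
      have hrep : List.replicate (n + 2) c ++ l = c :: c :: (List.replicate n c ++ l) := by
        simp [List.replicate_succ]
      rw [hrep, pvCnt]
      simp only [List.length_cons, PySem.Chars.count.go, hp, if_true]
      simp only [List.length_nil, List.drop_succ_cons, List.drop_zero]
      rw [pv_go_norm [c, c] (by simp) _ _ _ (Nat.le_add_right _ 1)]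
      rw [ih n (by omega) l hl]
      omega

-- per-character counter fields of pvStep
theorem pv_counter_inv (f : PvSt → Nat) (d : Char)
    (hstep : ∀ (s : PvSt) (ch : Char), f (pvStep s ch) = f s + (if ch = d then 1 else 0)) :
    ∀ (cs : List Char) (s : PvSt), f (cs.foldl pvStep s) = f s + cs.count d := by
  intro cs
  induction cs with
  | nil => simp
  | cons ch t ih =>
    intro s
    simp only [List.foldl_cons, ih, hstep, List.count_cons]
    have : (if (ch == d) = true then 1 else 0) = (if ch = d then 1 else 0) := by
      by_cases h : ch = d <;> simp [h]
    omega

theorem pv_code_inv :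
    ∀ (cs : List Char) (s : PvSt),
      (cs.foldl pvStep s).code + (cs.foldl pvStep s).bt / 3
        = s.code + pvCnt ['`', '`', '`'] (List.replicate s.bt '`' ++ cs) := by
  intro cs
  induction cs with
  | nil =>
    intro s
    simp only [List.foldl_nil, List.append_nil]
    have hrun := pv_cnt_triple_run '`' s.bt [] (by simp)
    rw [List.append_nil] at hrun
    rw [hrun]
    simp [pvCnt, PySem.Chars.count.go]
  | cons ch t ih =>
    intro s
    by_cases hch : ch = '`'
    · subst hch
      have hrep : List.replicate s.bt '`' ++ ('`' :: t) = List.replicate (s.bt + 1) '`' ++ t := by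
        rw [List.replicate_succ']
        simp
      simp only [List.foldl_cons, hrep]
      rw [ih]
      simp [pvStep]
    · have hflush : (pvStep s ch).code = s.code + s.bt / 3 ∧ (pvStep s ch).bt = 0 := by
        unfold pvStep
        split_ifs <;> simp_all
      simp only [List.foldl_cons]
      rw [ih, hflush.1, hflush.2]
      rw [pv_cnt_triple_run '`' s.bt (ch :: t) (by simpa using hch)]
      rw [pv_cnt_cons_ne '`' ['`', '`'] ch hch t]
      simp
      omega

theorem pv_bold_inv :
    ∀ (cs : List Char) (s : PvSt),
      (cs.foldl pvStep s).bold + (cs.foldl pvStep s).star / 2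
        = s.bold + pvCnt ['*', '*'] (List.replicate s.star '*' ++ cs) := by
  intro cs
  induction cs with
  | nil =>
    intro s
    simp only [List.foldl_nil, List.append_nil]
    have hrun := pv_cnt_double_run '*' s.star [] (by simp)
    rw [List.append_nil] at hrun
    rw [hrun]
    simp [pvCnt, PySem.Chars.count.go]
  | cons ch t ih =>
    intro s
    by_cases hch : ch = '*'
    · subst hch
      have hrep : List.replicate s.star '*' ++ ('*' :: t) = List.replicate (s.star + 1) '*' ++ t := by
        rw [List.replicate_succ']
        simp
      simp only [List.foldl_cons, hrep]
      rw [ih]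
      simp [pvStep]
    · have hflush : (pvStep s ch).bold = s.bold + s.star / 2 ∧ (pvStep s ch).star = 0 := by
        unfold pvStep
        split_ifs <;> simp_all
      simp only [List.foldl_cons]
      rw [ih, hflush.1, hflush.2]
      rw [pv_cnt_double_run '*' s.star (ch :: t) (by simpa using hch)]
      rw [pv_cnt_cons_ne '*' ['*'] ch hch t]
      simp
      omega

theorem pv_count_eq_cnt (s : String) (sub : List Char) (h : sub ≠ []) :
    PySem.Str.count s (String.ofList sub) = pvCnt sub s.toList := by
  simp [PySem.Str.count, PySem.Chars.count, pvCnt, List.isEmpty_iff, h]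

-- ===== VERDICT (by name: the statement is the Claim_ definition above) =====
set_option maxHeartbeats 1000000 in
theorem check_unbalanced_elements_py_spec : Claim_equal_check_unbalanced_elements_py := by
  intro content _
  unfold Spec_check_unbalanced_elements_py
  unfold check_unbalanced_elements_py check_unbalanced_elements_py_alt pvBalancingChars
  have hcode := pv_code_inv content.toList ⟨0, 0, 0, 0, 0, 0, 0, 0, 0, 0, 0⟩
  have hbold := pv_bold_inv content.toList ⟨0, 0, 0, 0, 0, 0, 0, 0, 0, 0, 0⟩
  simp only [List.replicate_zero, List.nil_append] at hcode hbold
  have hstars := pv_counter_inv (·.stars) '*'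
    (by intro s ch; unfold pvStep; split_ifs <;> simp_all) content.toList ⟨0,0,0,0,0,0,0,0,0,0,0⟩
  have hpo := pv_counter_inv (·.po) '('
    (by intro s ch; unfold pvStep; split_ifs <;> simp_all) content.toList ⟨0,0,0,0,0,0,0,0,0,0,0⟩
  have hpc := pv_counter_inv (·.pc) ')'
    (by intro s ch; unfold pvStep; split_ifs <;> simp_all) content.toList ⟨0,0,0,0,0,0,0,0,0,0,0⟩
  have hbo := pv_counter_inv (·.bo) '['
    (by intro s ch; unfold pvStep; split_ifs <;> simp_all) content.toList ⟨0,0,0,0,0,0,0,0,0,0,0⟩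
  have hbc := pv_counter_inv (·.bc) ']'
    (by intro s ch; unfold pvStep; split_ifs <;> simp_all) content.toList ⟨0,0,0,0,0,0,0,0,0,0,0⟩
  have hco := pv_counter_inv (·.co) '{'
    (by intro s ch; unfold pvStep; split_ifs <;> simp_all) content.toList ⟨0,0,0,0,0,0,0,0,0,0,0⟩
  have hcc := pv_counter_inv (·.cc) '}'
    (by intro s ch; unfold pvStep; split_ifs <;> simp_all) content.toList ⟨0,0,0,0,0,0,0,0,0,0,0⟩
  have h3 : PySem.Str.count content "```" = pvCnt ['`','`','`'] content.toList :=
    pv_count_eq_cnt content ['`','`','`'] (by simp)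
  have h2 : PySem.Str.count content "**" = pvCnt ['*','*'] content.toList :=
    pv_count_eq_cnt content ['*','*'] (by simp)
  have h1 : PySem.Str.count content "*" = content.toList.count '*' := by
    rw [pv_count_eq_cnt content ['*'] (by simp), pv_cnt_single]
  have hop : PySem.Str.count content "(" = content.toList.count '(' := by
    rw [pv_count_eq_cnt content ['('] (by simp), pv_cnt_single]
  have hcl : PySem.Str.count content ")" = content.toList.count ')' := by
    rw [pv_count_eq_cnt content [')'] (by simp), pv_cnt_single]
  have hop2 : PySem.Str.count content "[" = content.toList.count '[' := by
    rw [pv_count_eq_cnt content ['['] (by simp), pv_cnt_single]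
  have hcl2 : PySem.Str.count content "]" = content.toList.count ']' := by
    rw [pv_count_eq_cnt content [']'] (by simp), pv_cnt_single]
  have hop3 : PySem.Str.count content "{" = content.toList.count '{' := by
    rw [pv_count_eq_cnt content ['{'] (by simp), pv_cnt_single]
  have hcl3 : PySem.Str.count content "}" = content.toList.count '}' := by
    rw [pv_count_eq_cnt content ['}'] (by simp), pv_cnt_single]
  simp only [List.foldl_cons, List.foldl_nil]
  rw [h3, h2, h1, hop, hcl, hop2, hcl2, hop3, hcl3]
  rw [hcode, hbold, hstars, hpo, hpc, hbo, hbc, hco, hcc]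
  simp only [Nat.zero_add]
  split_ifs <;> simp_all
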